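-- pv_equiv track=rewrite | github.com/ABakker30/ballpuzzle4 | src/solver/engines/dfs_engine.py | _connected_r6
-- ===== SOURCE A (Python) =====
-- from typing import Iterator, Dict, Any, List, Tuple, Optional
--
-- I3 = Tuple[int, int, int]
--
-- R6_NEIGHBORS: List[I3] = [
--     ( 1, 0, 0), (-1, 0, 0),
--     ( 0, 1, 0), ( 0,-1, 0),
--     ( 0, 0, 1), ( 0, 0,-1),
-- ]
--
-- def _connected_r6(cells_ijk: List[I3]) -> bool:
--     if not cells_ijk:
--         return True
--     S = set(cells_ijk)
--     from collections import deque
--     q = deque([next(iter(S))])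
--     seen = set()
--     while q:
--         x, y, z = q.popleft()
--         if (x, y, z) in seen:
--             continue
--         seen.add((x, y, z))
--         for dx, dy, dz in R6_NEIGHBORS:
--             n = (x + dx, y + dy, z + dz)
--             if (n in S) and (n not in seen):
--                 q.append(n)
--     return len(seen) == len(S)
-- ===== SOURCE B (Python) =====
-- from typing import List, Tuple
--
-- I3 = Tuple[int, int, int]
--
-- R6_NEIGHBORS: List[I3] = [
--     ( 1, 0, 0), (-1, 0, 0),
--     ( 0, 1, 0), ( 0,-1, 0),
--     ( 0, 0, 1), ( 0, 0,-1),
-- ]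
--
-- def _connected_r6(cells_ijk: List[I3]) -> bool:
--     # round-based saturation to a fixpoint instead of a per-node BFS queue
--     if not cells_ijk:
--         return True
--     S = set(cells_ijk)
--     reached = {next(iter(S))}
--     while True:
--         grown = reached | {
--             (x, y, z) for (x, y, z) in S
--             if any((x + dx, y + dy, z + dz) in reached for dx, dy, dz in R6_NEIGHBORS)
--         }
--         if len(grown) == len(reached):
--             return len(reached) == len(S)
--         reached = grown
-- ===== Notes on version B (the rewrite author's own statement) =====
-- stated objective: alternative
-- what changed: Replaces the seeded per-node BFS queue with a round-based fixpoint saturation: the reached set is repeatedly grown by every cell adjacent to it (a whole-set scan per round) until it stops growing, then its size is compared to |S|.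
import Mathlib
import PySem

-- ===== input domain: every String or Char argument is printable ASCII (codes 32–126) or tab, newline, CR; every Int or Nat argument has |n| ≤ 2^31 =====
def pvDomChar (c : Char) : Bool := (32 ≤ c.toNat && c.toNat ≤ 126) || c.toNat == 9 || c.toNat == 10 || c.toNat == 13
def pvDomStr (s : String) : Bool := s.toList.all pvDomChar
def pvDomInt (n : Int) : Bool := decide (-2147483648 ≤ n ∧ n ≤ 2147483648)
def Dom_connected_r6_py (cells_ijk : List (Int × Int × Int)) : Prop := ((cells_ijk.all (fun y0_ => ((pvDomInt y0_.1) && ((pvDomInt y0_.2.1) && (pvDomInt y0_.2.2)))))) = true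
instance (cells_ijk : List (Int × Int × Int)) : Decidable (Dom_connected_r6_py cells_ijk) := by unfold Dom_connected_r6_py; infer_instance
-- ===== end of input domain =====

-- B replaces the seeded BFS queue by a round-based fixpoint saturation of the reached set (alternative
-- algorithm, similar cost). Both programs' results are independent of which element of the set seeds the
-- search (connectivity is seed-independent), so both ports seed with the first distinct cell where the
-- Pythons use next(iter(S)) (hash order).

-- ===== PORT A =====
-- R6_NEIGHBORS
def pvR6 : List (Int × Int × Int) :=
  [(1, 0, 0), (-1, 0, 0), (0, 1, 0), (0, -1, 0), (0, 0, 1), (0, 0, -1)]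

-- the six neighbours (x+dx, y+dy, z+dz) of a cell
def pvNbrs (c : Int × Int × Int) : List (Int × Int × Int) :=
  pvR6.map (fun d => (c.1 + d.1, c.2.1 + d.2.1, c.2.2 + d.2.2))

-- the while-q loop of A: pop x; skip if seen; else add x to seen and push its unseen S-neighbours
def pvBfs (S : List (Int × Int × Int)) (q : List (Int × Int × Int)) (seen : List (Int × Int × Int)) :
    List (Int × Int × Int) :=
  match q with
  | [] => seen
  | x :: qt =>
    if x ∈ seen then pvBfs S qt seen
    else
      let seen' := seen ++ [x]
      pvBfs S (qt ++ (pvNbrs x).filter (fun n => decide (n ∈ S ∧ n ∉ seen'))) seen'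
termination_by ((((q ++ S).toFinset \ seen.toFinset).card, q.length) : Nat × Nat)
decreasing_by
  · apply Prod.Lex.right'
    · apply Finset.card_le_card
      intro a ha
      simp only [Finset.mem_sdiff, List.toFinset_append, Finset.mem_union, List.mem_toFinset] at *
      tauto
    · simp
  · apply Prod.Lex.left
    apply Finset.card_lt_card
    constructor
    · intro a ha
      simp only [Finset.mem_sdiff, List.toFinset_append, Finset.mem_union, List.mem_toFinset,
        List.toFinset_cons, Finset.mem_insert, List.mem_filter, List.mem_append,
        List.mem_singleton, decide_eq_true_eq] at *
      tauto
    · intro hsub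
      have hx := hsub (a := x)
      simp only [Finset.mem_sdiff, List.toFinset_cons, List.toFinset_append, Finset.mem_union,
        Finset.mem_insert, List.mem_toFinset, List.mem_append, List.mem_singleton] at hx
      tauto

def connected_r6_py (cells_ijk : List (Int × Int × Int)) : Bool :=
  if cells_ijk = [] then true
  else
    let S := PySem.Set.ofList cells_ijk
    let seen := pvBfs S [S.headD (0, 0, 0)] []
    seen.length == S.length

-- ===== PORT B =====
-- one saturation round of B: reached | {cell of S with a neighbour in reached}
def pvGrowSet (S reached : List (Int × Int × Int)) : List (Int × Int × Int) :=
  PySem.Set.union reached (S.filter (fun c => (pvNbrs c).any (fun n => decide (n ∈ reached))))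

-- a round appends exactly the new cells, each of them in S and not yet reached
-- (cited by pvGrow's decreasing_by, so it lives above the claim block)
theorem pvGrowSet_extras (S reached : List (Int × Int × Int)) :
    ∃ ext, pvGrowSet S reached = reached ++ ext ∧ ∀ e ∈ ext, e ∈ S ∧ e ∉ reached := by
  have key : ∀ (l s : List (Int × Int × Int)),
      ∃ ext, PySem.Set.update s l = s ++ ext ∧ ∀ e ∈ ext, e ∈ l ∧ e ∉ s := by
    intro l
    induction l with
    | nil => exact fun s => ⟨[], by simp [PySem.Set.update_nil], by simp⟩
    | cons x l ih =>
      intro s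
      rw [PySem.Set.update_cons]
      by_cases hx : x ∈ s
      · rw [PySem.Set.add_of_mem hx]
        obtain ⟨ext, he, hp⟩ := ih s
        exact ⟨ext, he, fun e hes => ⟨List.mem_cons_of_mem _ (hp e hes).1, (hp e hes).2⟩⟩
      · rw [PySem.Set.add_of_not_mem hx]
        obtain ⟨ext, he, hp⟩ := ih (s ++ [x])
        refine ⟨x :: ext, by simpa using he, ?_⟩
        intro e hes
        rcases List.mem_cons.mp hes with rfl | hes
        · exact ⟨List.mem_cons_self .., hx⟩
        · have := hp e hes
          simp only [List.mem_append, List.mem_singleton] at this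
          exact ⟨List.mem_cons_of_mem _ this.1, fun c => this.2 (Or.inl c)⟩
  obtain ⟨ext, he, hp⟩ :=
    key (S.filter (fun c => (pvNbrs c).any (fun n => decide (n ∈ reached)))) reached
  exact ⟨ext, he, fun e hes => ⟨(List.mem_filter.mp (hp e hes).1).1, (hp e hes).2⟩⟩

-- the while-True loop of B: grow reached by one round, stop when nothing was added
def pvGrow (S : List (Int × Int × Int)) (reached : List (Int × Int × Int)) : Bool :=
  let grown := pvGrowSet S reached
  if h : grown.length = reached.length then reached.length == S.length
  else pvGrow S grown
termination_by (S.toFinset \ reached.toFinset).card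
decreasing_by
  obtain ⟨ext, he, hp⟩ := pvGrowSet_extras S reached
  have hne : ext ≠ [] := by
    intro h0
    apply h
    show (pvGrowSet S reached).length = reached.length
    rw [he, h0, List.append_nil]
  obtain ⟨e, hee⟩ := List.exists_mem_of_ne_nil ext hne
  have heS : e ∈ S := (hp e hee).1
  have henr : e ∉ reached := (hp e hee).2
  apply Finset.card_lt_card
  constructor
  · intro a ha
    simp only [Finset.mem_sdiff, List.mem_toFinset] at *
    refine ⟨ha.1, fun c => ha.2 ?_⟩
    rw [he]
    exact List.mem_append_left _ c
  · intro hsub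
    have hcon := hsub (a := e) (by simp only [Finset.mem_sdiff, List.mem_toFinset]; exact ⟨heS, henr⟩)
    simp only [Finset.mem_sdiff, List.mem_toFinset, he] at hcon
    exact hcon.2 (by simp [hee])

def connected_r6_py_alt (cells_ijk : List (Int × Int × Int)) : Bool :=
  if cells_ijk = [] then true
  else
    let S := PySem.Set.ofList cells_ijk
    pvGrow S [S.headD (0, 0, 0)]

-- ===== PRECONDITION & SPEC =====
def Spec_connected_r6_py (cells_ijk : List (Int × Int × Int)) (out : Bool) : Prop := out = connected_r6_py_alt cells_ijk
instance (cells_ijk : List (Int × Int × Int)) (out : Bool) : Decidable (Spec_connected_r6_py cells_ijk out) := by unfold Spec_connected_r6_py; infer_instance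

-- ===== CLAIM (what is proved, stated in full; the proofs are below) =====
def Claim_equal_connected_r6_py : Prop := ∀ (cells_ijk : List (Int × Int × Int)), Dom_connected_r6_py cells_ijk → Spec_connected_r6_py cells_ijk (connected_r6_py cells_ijk)

-- ===== LEMMAS AND PROOFS =====

-- C is closed under taking r6-neighbours inside S
def pvClosed (S C : List (Int × Int × Int)) : Prop :=
  ∀ c ∈ S, (∃ n ∈ pvNbrs c, n ∈ C) → c ∈ C

theorem pvNbrs_symm (c n : Int × Int × Int) (h : n ∈ pvNbrs c) : c ∈ pvNbrs n := by
  obtain ⟨a, b, c⟩ := c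
  obtain ⟨d, e, f⟩ := n
  simp only [pvNbrs, pvR6, List.map_cons, List.map_nil, List.mem_cons, List.not_mem_nil,
    or_false, Prod.mk.injEq] at h ⊢
  rcases h with ⟨rfl,rfl,rfl⟩|⟨rfl,rfl,rfl⟩|⟨rfl,rfl,rfl⟩|⟨rfl,rfl,rfl⟩|⟨rfl,rfl,rfl⟩|⟨rfl,rfl,rfl⟩
  · right; left; omega
  · left; omega
  · right; right; right; left; omega
  · right; right; left; omega
  · right; right; right; right; right; omega
  · right; right; right; right; left; omega

-- everything in seen or q ends up in the BFS result
theorem pvBfs_mono (S q seen : List (Int × Int × Int)) :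
    ∀ a, a ∈ seen ∨ a ∈ q → a ∈ pvBfs S q seen := by
  fun_induction pvBfs with
  | case1 seen =>
    intro a ha
    rcases ha with h | h
    · simpa [pvBfs] using h
    · exact absurd h List.not_mem_nil
  | case2 seen x qt hx ih =>
    intro a ha
    apply ih
    rcases ha with h | h
    · exact Or.inl h
    · rcases List.mem_cons.mp h with rfl | h
      · exact Or.inl hx
      · exact Or.inr h
  | case3 seen x qt hx seen' ih =>
    intro a ha
    apply ih
    rcases ha with h | h
    · exact Or.inl (List.mem_append_left _ h)
    · rcases List.mem_cons.mp h with rfl | h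
      · exact Or.inl (by simp [seen'])
      · exact Or.inr (List.mem_append_left _ h)

-- the BFS result is contained in every closed set containing seen and q
theorem pvBfs_sound (S C : List (Int × Int × Int)) (hC : pvClosed S C) :
    ∀ q seen, (∀ a ∈ q, a ∈ C) → (∀ a ∈ seen, a ∈ C) → ∀ a ∈ pvBfs S q seen, a ∈ C := by
  intro q seen
  fun_induction pvBfs with
  | case1 seen =>
    intro _ hs
    simpa [pvBfs] using hs
  | case2 seen x qt hx ih =>
    intro hq hs
    exact ih (fun a ha => hq a (List.mem_cons_of_mem _ ha)) hs
  | case3 seen x qt hx seen' ih =>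
    intro hq hs
    have hxC : x ∈ C := hq x (List.mem_cons_self ..)
    have hs' : ∀ a ∈ seen', a ∈ C := by
      intro a ha
      rcases List.mem_append.mp ha with h | h
      · exact hs a h
      · rcases List.mem_singleton.mp h with rfl
        exact hxC
    apply ih _ hs'
    intro a ha
    rcases List.mem_append.mp ha with h | h
    · exact hq a (List.mem_cons_of_mem _ h)
    · have hfa := List.mem_filter.mp h
      have haS : a ∈ S ∧ a ∉ seen' := by simpa using hfa.2
      exact hC a haS.1 ⟨x, pvNbrs_symm x a hfa.1, hxC⟩

theorem pvBfs_nodup (S : List (Int × Int × Int)) :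
    ∀ q seen, seen.Nodup → (pvBfs S q seen).Nodup := by
  intro q seen
  fun_induction pvBfs with
  | case1 seen => intro hs; simpa [pvBfs] using hs
  | case2 seen x qt hx ih => exact ih
  | case3 seen x qt hx seen' ih =>
    intro hs
    apply ih
    show (seen ++ [x]).Nodup
    rw [List.nodup_append]
    refine ⟨hs, List.nodup_singleton _, ?_⟩
    intro a ha b hb
    rcases List.mem_singleton.mp hb with rfl
    exact fun he => hx (he ▸ ha)

-- if every S-cell with a neighbour in seen is already in seen or q, the BFS result is closed
theorem pvBfs_closed (S : List (Int × Int × Int)) :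
    ∀ q seen, (∀ c ∈ S, (∃ n ∈ pvNbrs c, n ∈ seen) → c ∈ seen ∨ c ∈ q) →
    pvClosed S (pvBfs S q seen) := by
  intro q seen
  fun_induction pvBfs with
  | case1 seen =>
    intro hinv c hc hn
    have : c ∈ seen ∨ c ∈ ([] : List (Int × Int × Int)) := hinv c hc hn
    simpa [pvBfs] using this.resolve_right List.not_mem_nil
  | case2 seen x qt hx ih =>
    intro hinv
    apply ih
    intro c hc hn
    rcases hinv c hc hn with h | h
    · exact Or.inl h
    · rcases List.mem_cons.mp h with rfl | h
      · exact Or.inl hx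
      · exact Or.inr h
  | case3 seen x qt hx seen' ih =>
    intro hinv
    apply ih
    intro c hc hn
    obtain ⟨n, hnn, hns⟩ := hn
    rcases List.mem_append.mp hns with hns | hns
    · rcases hinv c hc ⟨n, hnn, hns⟩ with h | h
      · exact Or.inl (List.mem_append_left _ h)
      · rcases List.mem_cons.mp h with rfl | h
        · exact Or.inl (by simp [seen'])
        · exact Or.inr (List.mem_append_left _ h)
    · rcases List.mem_singleton.mp hns with rfl
      have hcx : c ∈ pvNbrs n := pvNbrs_symm c n hnn
      by_cases hcs : c ∈ seen'
      · exact Or.inl hcs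
      · refine Or.inr (List.mem_append_right _ ?_)
        rw [List.mem_filter]
        exact ⟨hcx, by simp [hc, hcs]⟩

-- membership in one saturation round
theorem pvGrowSet_mem (S reached : List (Int × Int × Int)) (a : Int × Int × Int) :
    a ∈ pvGrowSet S reached ↔ a ∈ reached ∨ (a ∈ S ∧ ∃ n ∈ pvNbrs a, n ∈ reached) := by
  have hb : pvGrowSet S reached = PySem.Set.update reached
      (S.filter (fun c => (pvNbrs c).any (fun n => decide (n ∈ reached)))) := rfl
  rw [hb, PySem.Set.mem_update, List.mem_filter]
  simp

theorem pvGrowSet_nodup (S reached : List (Int × Int × Int)) (h : reached.Nodup) :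
    (pvGrowSet S reached).Nodup := by
  have hb : pvGrowSet S reached = PySem.Set.update reached
      (S.filter (fun c => (pvNbrs c).any (fun n => decide (n ∈ reached)))) := rfl
  rw [hb]
  exact PySem.Set.nodup_update _ _ h

-- B's saturation loop, started inside the closure T of its start set, answers |T| == |S|
theorem pvGrow_eq (S T : List (Int × Int × Int)) (hTn : T.Nodup) (hTc : pvClosed S T) :
    ∀ reached, reached.Nodup → (∀ a ∈ reached, a ∈ T) →
    (∀ C, pvClosed S C → (∀ a ∈ reached, a ∈ C) → ∀ a ∈ T, a ∈ C) →
    pvGrow S reached = (T.length == S.length) := by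
  intro reached
  fun_induction pvGrow with
  | case1 reached grown h =>
    intro hrn hrT hmin
    obtain ⟨ext, he, hp⟩ := pvGrowSet_extras S reached
    have hext : ext = [] := by
      have hlen := h
      rw [show grown = reached ++ ext from he] at hlen
      simpa using hlen
    have hgr : grown = reached := by
      rw [show grown = reached ++ ext from he, hext, List.append_nil]
    have hclosed : pvClosed S reached := by
      intro c hc hn
      have hcg : c ∈ grown := (pvGrowSet_mem S reached c).mpr (Or.inr ⟨hc, hn⟩)
      rwa [hgr] at hcg
    have hTr : ∀ a ∈ T, a ∈ reached := hmin reached hclosed (fun a ha => ha)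
    have hperm : T.Perm reached :=
      (List.perm_ext_iff_of_nodup hTn hrn).mpr (fun a => ⟨hTr a, hrT a⟩)
    rw [hperm.length_eq]
  | case2 reached grown h ih =>
    intro hrn hrT hmin
    have hrg : ∀ a ∈ reached, a ∈ grown :=
      fun a ha => (pvGrowSet_mem S reached a).mpr (Or.inl ha)
    apply ih
    · exact pvGrowSet_nodup S reached hrn
    · intro a ha
      rcases (pvGrowSet_mem S reached a).mp ha with h' | h'
      · exact hrT a h'
      · obtain ⟨haS, n, hnn, hnr⟩ := h'
        exact hTc a haS ⟨n, hnn, hrT n hnr⟩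
    · intro C hC hgC
      exact hmin C hC (fun a ha => hgC a (hrg a ha))

-- ===== VERDICT (by name: the statement is the Claim_ definition above) =====
theorem connected_r6_py_spec : Claim_equal_connected_r6_py := by
  unfold Claim_equal_connected_r6_py
  intro cells _
  unfold Spec_connected_r6_py connected_r6_py connected_r6_py_alt
  by_cases hc : cells = []
  · simp [hc]
  · simp only [if_neg hc]
    have hTn : (pvBfs (PySem.Set.ofList cells) [(PySem.Set.ofList cells).headD (0, 0, 0)] []).Nodup :=
      pvBfs_nodup _ _ _ List.nodup_nil
    have hTc : pvClosed (PySem.Set.ofList cells)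
        (pvBfs (PySem.Set.ofList cells) [(PySem.Set.ofList cells).headD (0, 0, 0)] []) := by
      apply pvBfs_closed
      intro c _ hn
      obtain ⟨n, _, hns⟩ := hn
      exact absurd hns List.not_mem_nil
    rw [pvGrow_eq _ _ hTn hTc [(PySem.Set.ofList cells).headD (0, 0, 0)]
      (List.nodup_singleton _) ?_ ?_]
    · intro a ha
      rcases List.mem_singleton.mp ha with rfl
      exact pvBfs_mono _ _ _ _ (Or.inr (by simp))
    · intro C hC hseedC
      exact pvBfs_sound _ C hC _ [] hseedC (fun a ha => absurd ha List.not_mem_nil)
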